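-- pv_equiv track=rewrite | github.com/doneworkof/socket_engine | window.py | check_room_name
-- ===== SOURCE A (Python) =====
-- from string import ascii_lowercase, ascii_uppercase, digits
--
-- ALLOWED_SYMBOLS = ascii_uppercase + ascii_lowercase + digits + '_'
--
-- def check_room_name(name):
--     non_empty = False
--     for ch in name:
--         if ch not in [' ', '\n']:
--             non_empty = True
--         if ch not in ALLOWED_SYMBOLS:
--             return False
--     return non_empty
-- ===== SOURCE B (Python) =====
-- from string import ascii_lowercase, ascii_uppercase, digits
--
-- ALLOWED_SET = set(ascii_uppercase + ascii_lowercase + digits + '_')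
--
-- def check_room_name(name):
--     return bool(name) and not (set(name) - ALLOWED_SET)
-- ===== Notes on version B (the rewrite author's own statement) =====
-- stated objective: simpler
-- what changed: Replaces the per-character scan with early returns and a running non_empty flag by a single aggregate set-difference: since space and newline are themselves disallowed, the result is just non-emptiness plus set(name) - ALLOWED_SET being empty.
import Mathlib
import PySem

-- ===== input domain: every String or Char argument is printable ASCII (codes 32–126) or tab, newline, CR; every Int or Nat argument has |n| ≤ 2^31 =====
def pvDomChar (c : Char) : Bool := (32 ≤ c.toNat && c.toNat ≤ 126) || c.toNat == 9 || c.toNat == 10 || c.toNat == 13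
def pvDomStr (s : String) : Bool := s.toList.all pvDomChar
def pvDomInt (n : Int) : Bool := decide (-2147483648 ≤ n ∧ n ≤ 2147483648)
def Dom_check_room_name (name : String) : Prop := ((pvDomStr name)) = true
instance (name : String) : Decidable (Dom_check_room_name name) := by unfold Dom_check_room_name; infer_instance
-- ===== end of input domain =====

-- B validates the room name with one aggregate set-difference instead of A's per-character scan with a running flag (objective: simpler).
-- ===== PORT A =====
def allowedSymbols : List Char :=
  "ABCDEFGHIJKLMNOPQRSTUVWXYZabcdefghijklmnopqrstuvwxyz0123456789_".toList

def checkLoop : List Char → Bool → Bool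
  | [], nonEmpty => nonEmpty
  | ch :: rest, nonEmpty =>
    let nonEmpty' := if ¬ (ch = ' ' ∨ ch = '\n') then true else nonEmpty
    if ¬ allowedSymbols.contains ch then false else checkLoop rest nonEmpty'

def check_room_name (name : String) : Bool := checkLoop name.toList false

-- ===== PORT B =====
def allowedSet : PySem.Set Char := PySem.Set.ofList allowedSymbols

def check_room_name_alt (name : String) : Bool :=
  (!(name == "")) && (PySem.Set.diff (PySem.Set.ofList name.toList) allowedSet).isEmpty

-- ===== PRECONDITION & SPEC =====
def Spec_check_room_name (name : String) (out : Bool) : Prop := out = check_room_name_alt name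
instance (name : String) (out : Bool) : Decidable (Spec_check_room_name name out) := by unfold Spec_check_room_name; infer_instance

-- ===== CLAIM (what is proved, stated in full; the proofs are below) =====
def Claim_equal_check_room_name : Prop := ∀ (name : String), Dom_check_room_name name → Spec_check_room_name name (check_room_name name)

-- ===== LEMMAS AND PROOFS =====
theorem checkLoop_eq (l : List Char) (ne : Bool) :
    checkLoop l ne = (l.all allowedSymbols.contains && (ne || !l.isEmpty)) := by
  induction l generalizing ne with
  | nil => simp [checkLoop]
  | cons ch rest ih =>
    by_cases h : ch ∈ allowedSymbols
    · have h1 : ch ≠ ' ' := by rintro rfl; revert h; decide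
      have h2 : ch ≠ '\n' := by rintro rfl; revert h; decide
      simp [checkLoop, h, h1, h2, ih]
    · simp [checkLoop, h]

theorem diff_empty_iff (l : List Char) :
    (PySem.Set.diff (PySem.Set.ofList l) allowedSet).isEmpty = l.all allowedSymbols.contains := by
  rw [Bool.eq_iff_iff]
  simp [List.isEmpty_iff, List.eq_nil_iff_forall_not_mem, PySem.Set.mem_diff,
    PySem.Set.mem_ofList, allowedSet, List.all_eq_true]

-- ===== VERDICT (by name: the statement is the Claim_ definition above) =====
theorem check_room_name_spec : Claim_equal_check_room_name := by
  intro name _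
  unfold Spec_check_room_name check_room_name check_room_name_alt
  rw [checkLoop_eq, diff_empty_iff]
  cases h : name.toList.all allowedSymbols.contains
  · simp
  · rw [Bool.eq_iff_iff]
    simp [String.toList_eq_nil_iff]
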